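-- pv_equiv track=rewrite | github.com/rlacksals96/algorithm | Programmers/Summer_winter_coding/숫자 게임/num_game.py | solution
-- ===== SOURCE A (Python) =====
-- def solution(A, B):
--     answer = 0
--     A.sort(reverse=True)
--     B.sort(reverse=True)
--
--     for i in range(len(A)):
--         if B[0] > A[0]:
--             answer += 1
--             B.pop(0)
--         A.pop(0)
--     return answer
-- ===== SOURCE B (Python) =====
-- def solution(A, B):
--     # Two pointers over descending-sorted copies; no O(n) pop(0).
--     # Note: A mutates its arguments (sorts and empties them); B does not.
--     As = sorted(A, reverse=True)
--     Bs = sorted(B, reverse=True)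
--     i = 0
--     answer = 0
--     for a in As:
--         if i < len(Bs) and Bs[i] > a:
--             answer += 1
--             i += 1
--     return answer
-- ===== Notes on version B (the rewrite author's own statement) =====
-- stated objective: faster
-- what changed: Replaced the destructive loop that repeatedly pops the heads of both lists (each pop(0) shifting the whole list) with a single two-pointer pass over non-mutating sorted copies.
import Mathlib
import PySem

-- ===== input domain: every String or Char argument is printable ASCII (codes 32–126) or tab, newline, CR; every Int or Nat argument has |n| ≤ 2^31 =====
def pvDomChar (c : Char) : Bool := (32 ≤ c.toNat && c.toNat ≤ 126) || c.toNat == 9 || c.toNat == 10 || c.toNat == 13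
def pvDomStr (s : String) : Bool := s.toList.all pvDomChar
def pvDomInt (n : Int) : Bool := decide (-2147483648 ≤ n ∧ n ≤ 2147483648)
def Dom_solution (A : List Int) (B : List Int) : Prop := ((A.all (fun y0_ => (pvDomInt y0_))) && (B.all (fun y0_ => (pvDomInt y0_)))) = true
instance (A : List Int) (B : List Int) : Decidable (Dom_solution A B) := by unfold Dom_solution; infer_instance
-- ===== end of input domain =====

-- B replaces A's quadratic pop(0)-driven greedy by one two-pointer pass over sorted copies
-- (faster in a timing run); A mutates its arguments (sorts and empties them), B does not —
-- the equivalence proved here is about the return value only.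

-- ===== PORT A =====
-- The loop 'for i in range(len(A))' pops A's head each iteration and conditionally pops B's
-- head; we transcribe it as structural recursion on the (descending-sorted) A list.
def solLoopA : List Int → List Int → Int → Int
  | [], _, ans => ans
  | _ :: _, [], ans => ans   -- Python raises IndexError here (B[0] on empty B); excluded by Pre_solution
  | a :: As, b :: Bs, ans =>
      if b > a then solLoopA As Bs (ans + 1) else solLoopA As (b :: Bs) ans

def solution (A : List Int) (B : List Int) : Int :=
  solLoopA (PySem.List.sorted A (fun x => x) true) (PySem.List.sorted B (fun x => x) true) 0

-- ===== PORT B =====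
def solution_alt (A : List Int) (B : List Int) : Int :=
  let As := PySem.List.sorted A (fun x => x) true
  let Bs := PySem.List.sorted B (fun x => x) true
  -- for a in As: if i < len(Bs) and Bs[i] > a: answer += 1; i += 1
  (As.foldl
    (fun (st : Int × Int) a =>
      if st.1 < (Bs.length : Int) ∧ PySem.List.pyGetD Bs st.1 0 > a then (st.1 + 1, st.2 + 1) else st)
    (0, 0)).2

-- ===== PRECONDITION & SPEC =====
-- Pre_solution is exactly the set of inputs on which Python A returns: A raises IndexError
-- precisely when len(B) < len(A) and every B element pairs off (sorted ascending) strictly above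
-- the corresponding element of A's ascending tail, so that B is exhausted before the loop ends.
def Pre_solution (A : List Int) (B : List Int) : Prop :=
  A = [] ∨ A.length ≤ B.length ∨
    ∃ i < B.length,
      (PySem.List.sorted B (fun x => x) false).getD i 0 ≤
        (PySem.List.sorted A (fun x => x) false).getD (i + 1) 0
instance (A : List Int) (B : List Int) : Decidable (Pre_solution A B) := by
  unfold Pre_solution; infer_instance

def pvWitness_solution : List Int × List Int := ([3, 1, 5], [2, 4, 6])

def Spec_solution (A : List Int) (B : List Int) (out : Int) : Prop := out = solution_alt A B
instance (A : List Int) (B : List Int) (out : Int) : Decidable (Spec_solution A B out) := by unfold Spec_solution; infer_instance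

-- ===== CLAIM (what is proved, stated in full; the proofs are below) =====
def Claim_equal_solution : Prop := ∀ (A : List Int) (B : List Int), Dom_solution A B → Pre_solution A B → Spec_solution A B (solution A B)

-- ===== LEMMAS AND PROOFS =====

-- Once the pointer has passed the end of Bs, the fold never changes its state.
theorem foldB_stuck (Bs : List Int) (As : List Int) (i ans : Int)
    (h : (Bs.length : Int) ≤ i) :
    As.foldl
      (fun (st : Int × Int) a =>
        if st.1 < (Bs.length : Int) ∧ PySem.List.pyGetD Bs st.1 0 > a then (st.1 + 1, st.2 + 1) else st)
      (i, ans) = (i, ans) := by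
  induction As with
  | nil => rfl
  | cons a As ih =>
    simp only [List.foldl_cons]
    rw [if_neg (by rintro ⟨h1, -⟩; omega)]
    exact ih

-- The pointer fold over As starting at index i computes the pop(0) recursion on Bs.drop i.
theorem foldB_eq_loopA (Bs : List Int) (As : List Int) (i : Nat) (ans : Int) :
    (As.foldl
      (fun (st : Int × Int) a =>
        if st.1 < (Bs.length : Int) ∧ PySem.List.pyGetD Bs st.1 0 > a then (st.1 + 1, st.2 + 1) else st)
      ((i : Int), ans)).2 = solLoopA As (Bs.drop i) ans := by
  induction As generalizing i ans with
  | nil => simp [solLoopA]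
  | cons a As ih =>
    by_cases hi : i < Bs.length
    · have hdrop : Bs.drop i = Bs[i] :: Bs.drop (i + 1) := List.drop_eq_getElem_cons hi
      have hget : PySem.List.pyGetD Bs (i : Int) 0 = Bs[i] := by
        rw [PySem.List.pyGetD_natCast]
        exact List.getD_eq_getElem Bs 0 hi
      simp only [List.foldl_cons, hdrop, solLoopA]
      by_cases hb : Bs[i] > a
      · rw [if_pos ⟨by exact_mod_cast hi, by rw [hget]; exact hb⟩, if_pos hb]
        have : ((i : Int) + 1, ans + 1) = (((i + 1 : Nat) : Int), ans + 1) := by push_cast; rfl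
        rw [this, ih]
      · rw [if_neg (by rintro ⟨-, h2⟩; rw [hget] at h2; exact hb h2), if_neg hb, ← hdrop, ih,
          hdrop]
    · have hdrop : Bs.drop i = [] := List.drop_eq_nil_of_le (by omega)
      rw [hdrop, foldB_stuck Bs (a :: As) (i : Int) ans (by exact_mod_cast Nat.le_of_not_lt hi)]
      cases As <;> rfl

-- ===== VERDICT (by name: the statement is the Claim_ definition above) =====
theorem solution_spec : Claim_equal_solution := by
  intro A B _ _
  unfold Spec_solution solution solution_alt
  have := foldB_eq_loopA (PySem.List.sorted B (fun x => x) true)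
    (PySem.List.sorted A (fun x => x) true) 0 0
  simpa using this.symm
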